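-- pv_equiv track=rewrite | github.com/aqntks/ICD | core/old_temp.py | code1ocr_issue_encnum
-- ===== SOURCE A (Python) =====
-- def code1ocr_issue_encnum(results):
--     result_line = []
--
--     for r in results:
--         line = r[1].replace(' ', '')
--         result_line.append(line)
--
--     if len(result_line) == 2:
--         issue = result_line[0]
--         encnum = result_line[1]
--     else:
--         encnum = '~'
--         issue = result_line[0]
--
--     if encnum != '-':
--         en_dg_list = ['A', 'B', 'C', 'D', 'E', 'F', 'G', 'H', 'I', 'J', 'K', 'L', 'M', 'N', 'O', 'P', 'Q', 'R', 'S',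
--                       'T', 'U', 'V', 'W', 'X', 'Y', 'Z', '0', '1', '2', '3', '4', '5', '6', '7', '8', '9']
--         encnum = encnum.replace('-', '').replace('.', '').replace('(', '')
--         for e in encnum:
--             if (e in en_dg_list) is False:
--                 encnum = encnum.replace(e, '')
--
--     issue = issue.replace('-', '').replace('(', '').replace('L', '1').replace('O', '0').replace('Q', '0') \
--         .replace('U', '0').replace('D', '0').replace('I', '1').replace('Z', '2').replace('B', '3') \
--         .replace('A', '4').replace('S', '5').replace('T', '1')
--
--     return issue, encnum
-- ===== SOURCE B (Python) =====
-- def code1ocr_issue_encnum(results):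
--     result_line = []
--     for r in results:
--         result_line.append(r[1].replace(' ', ''))
--
--     if len(result_line) == 2:
--         issue = result_line[0]
--         encnum = result_line[1]
--     else:
--         encnum = '~'
--         issue = result_line[0]
--
--     if encnum != '-':
--         # single pass: keep only uppercase letters and digits
--         kept = []
--         for c in encnum:
--             if ('A' <= c <= 'Z') or ('0' <= c <= '9'):
--                 kept.append(c)
--         encnum = ''.join(kept)
--
--     # single pass over issue instead of 13 sequential full-string replaces
--     out = []
--     for c in issue:
--         if c == '-' or c == '(':
--             continue
--         elif c == 'L' or c == 'I' or c == 'T':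
--             out.append('1')
--         elif c == 'O' or c == 'Q' or c == 'U' or c == 'D':
--             out.append('0')
--         elif c == 'Z':
--             out.append('2')
--         elif c == 'B':
--             out.append('3')
--         elif c == 'A':
--             out.append('4')
--         elif c == 'S':
--             out.append('5')
--         else:
--             out.append(c)
--     issue = ''.join(out)
--
--     return issue, encnum
-- ===== Notes on version B (the rewrite author's own statement) =====
-- stated objective: simpler
-- what changed: Replaced A's 13 sequential full-string replace calls for issue and its remove-then-rescan replace-in-loop cleanup for encnum by one single left-to-right pass per string that maps or keeps each character directly.
import Mathlib
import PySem

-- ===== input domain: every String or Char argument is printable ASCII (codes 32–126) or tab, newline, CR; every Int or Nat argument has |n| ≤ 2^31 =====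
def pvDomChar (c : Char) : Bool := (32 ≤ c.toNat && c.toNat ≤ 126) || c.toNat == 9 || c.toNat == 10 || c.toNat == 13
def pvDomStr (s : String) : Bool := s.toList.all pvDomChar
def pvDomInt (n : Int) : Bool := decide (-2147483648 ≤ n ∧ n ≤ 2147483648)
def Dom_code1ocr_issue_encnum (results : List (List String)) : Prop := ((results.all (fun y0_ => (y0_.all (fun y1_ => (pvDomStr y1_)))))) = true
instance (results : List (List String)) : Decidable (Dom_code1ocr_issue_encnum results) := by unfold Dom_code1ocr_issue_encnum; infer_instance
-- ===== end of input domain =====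

-- B replaces A's 13-step replace chain and the repeated replace-in-loop cleanup by one
-- single-pass scan per string (simpler; same result).

-- ===== PORT A =====
def code1ocr_issue_encnum (results : List (List String)) : String × String :=
  let result_line : List String :=
    results.foldl (fun acc r => acc ++ [PySem.Str.replace ((PySem.List.pyGet? r 1).getD "") " " ""]) []
  let p : String × String :=
    if result_line.length = 2 then
      ((PySem.List.pyGet? result_line 0).getD "", (PySem.List.pyGet? result_line 1).getD "")
    else
      ((PySem.List.pyGet? result_line 0).getD "", "~")
  let issue := p.1
  let encnum := p.2
  let encnum :=
    if encnum ≠ "-" then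
      let en_dg_list : List Char :=
        ['A','B','C','D','E','F','G','H','I','J','K','L','M','N','O','P','Q','R','S',
         'T','U','V','W','X','Y','Z','0','1','2','3','4','5','6','7','8','9']
      let encnum1 := PySem.Str.replace (PySem.Str.replace (PySem.Str.replace encnum "-" "") "." "") "(" ""
      encnum1.toList.foldl
        (fun en e => if en_dg_list.contains e = false then PySem.Str.replace en (String.ofList [e]) "" else en)
        encnum1
    else encnum
  let issue :=
    PySem.Str.replace (PySem.Str.replace (PySem.Str.replace (PySem.Str.replace (PySem.Str.replace
      (PySem.Str.replace (PySem.Str.replace (PySem.Str.replace (PySem.Str.replace (PySem.Str.replace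
      (PySem.Str.replace (PySem.Str.replace (PySem.Str.replace issue "-" "") "(" "") "L" "1") "O" "0")
      "Q" "0") "U" "0") "D" "0") "I" "1") "Z" "2") "B" "3") "A" "4") "S" "5") "T" "1"
  (issue, encnum)

-- ===== PORT B =====
def code1ocr_issue_encnum_alt (results : List (List String)) : String × String :=
  let result_line : List String :=
    results.foldl (fun acc r => acc ++ [PySem.Str.replace ((PySem.List.pyGet? r 1).getD "") " " ""]) []
  let p : String × String :=
    if result_line.length = 2 then
      ((PySem.List.pyGet? result_line 0).getD "", (PySem.List.pyGet? result_line 1).getD "")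
    else
      ((PySem.List.pyGet? result_line 0).getD "", "~")
  let issue := p.1
  let encnum := p.2
  let encnum :=
    if encnum ≠ "-" then
      -- single pass: keep only uppercase letters and digits
      String.ofList (encnum.toList.foldl
        (fun kept c => if ('A' ≤ c ∧ c ≤ 'Z') ∨ ('0' ≤ c ∧ c ≤ '9') then kept ++ [c] else kept) [])
    else encnum
  -- single pass over issue instead of 13 sequential full-string replaces
  let issue :=
    String.ofList (issue.toList.foldl
      (fun out c =>
        if c = '-' ∨ c = '(' then out
        else if c = 'L' ∨ c = 'I' ∨ c = 'T' then out ++ ['1']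
        else if c = 'O' ∨ c = 'Q' ∨ c = 'U' ∨ c = 'D' then out ++ ['0']
        else if c = 'Z' then out ++ ['2']
        else if c = 'B' then out ++ ['3']
        else if c = 'A' then out ++ ['4']
        else if c = 'S' then out ++ ['5']
        else out ++ [c]) [])
  (issue, encnum)

-- ===== PRECONDITION & SPEC =====
-- Pre_ excludes exactly the inputs on which the Python A raises an IndexError:
-- an empty results list (result_line[0]) or an inner list with fewer than two elements (r[1]).
def Pre_code1ocr_issue_encnum (results : List (List String)) : Prop :=
  results ≠ [] ∧ ∀ r ∈ results, 2 ≤ r.length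
instance (results : List (List String)) : Decidable (Pre_code1ocr_issue_encnum results) := by
  unfold Pre_code1ocr_issue_encnum; infer_instance

def pvWitness_code1ocr_issue_encnum : List (List String) :=
  [["issue", "AB-1 X"], ["encnum", "c3.D(9"]]

def Spec_code1ocr_issue_encnum (results : List (List String)) (out : String × String) : Prop := out = code1ocr_issue_encnum_alt results
instance (results : List (List String)) (out : String × String) : Decidable (Spec_code1ocr_issue_encnum results out) := by unfold Spec_code1ocr_issue_encnum; infer_instance

-- ===== CLAIM (what is proved, stated in full; the proofs are below) =====
def Claim_equal_code1ocr_issue_encnum : Prop := ∀ (results : List (List String)), Dom_code1ocr_issue_encnum results → Pre_code1ocr_issue_encnum results → Spec_code1ocr_issue_encnum results (code1ocr_issue_encnum results)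

-- ===== LEMMAS AND PROOFS =====

-- replace.go on a single-character pattern is a char-local flatMap
theorem go_single (a : Char) (new : List Char) :
    ∀ (fuel : Nat) (l acc : List Char), l.length ≤ fuel →
      PySem.Chars.replace.go [a] new fuel l acc
        = acc.reverse ++ l.flatMap (fun c => if c = a then new else [c]) := by
  intro fuel
  induction fuel with
  | zero =>
    intro l acc h
    have : l = [] := List.eq_nil_of_length_eq_zero (Nat.le_zero.mp h)
    subst this
    simp [PySem.Chars.replace.go]
  | succ n ih =>
    intro l acc h
    cases l with
    | nil => simp [PySem.Chars.replace.go]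
    | cons c t =>
      by_cases hc : c = a
      · subst hc
        have : [c].isPrefixOf (c :: t) = true := by simp [List.isPrefixOf]
        simp only [PySem.Chars.replace.go, this, if_pos, List.length_singleton,
          List.drop_succ_cons, List.drop_zero]
        rw [ih t (new.reverse ++ acc) (by simpa using Nat.le_of_succ_le_succ h)]
        simp
      · have : [a].isPrefixOf (c :: t) = false := by
          simp [List.isPrefixOf, beq_iff_eq]
          exact fun h' => (hc h'.symm).elim
        simp only [PySem.Chars.replace.go, this]
        rw [if_neg (by simp [this])]
        rw [ih t (c :: acc) (by simpa using Nat.le_of_succ_le_succ h)]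
        simp [hc]

theorem replace_single (s : List Char) (a : Char) (new : List Char) :
    PySem.Chars.replace s [a] new = s.flatMap (fun c => if c = a then new else [c]) := by
  rw [PySem.Chars.replace]
  simp only [List.isEmpty, if_neg]
  exact go_single a new s.length s [] (le_refl _)

theorem replace_del (s : List Char) (a : Char) :
    PySem.Chars.replace s [a] [] = s.filter (fun c => !(c == a)) := by
  rw [replace_single]
  induction s with
  | nil => rfl
  | cons c t ih =>
    by_cases h : c = a <;> simp [h, ih]

theorem replace_map (s : List Char) (a b : Char) :
    PySem.Chars.replace s [a] [b] = s.map (fun c => if c = a then b else c) := by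
  rw [replace_single]
  induction s with
  | nil => rfl
  | cons c t ih =>
    by_cases h : c = a <;> simp [h, ih]

-- A's "remove every disallowed char with replace" loop is a filter of the start value
theorem loop_filter (good : Char → Bool) :
    ∀ (l acc : List Char),
      l.foldl (fun en e => if good e = false then en.filter (fun c => !(c == e)) else en) acc
        = acc.filter (fun c => good c || !(l.contains c)) := by
  intro l
  induction l with
  | nil => intro acc; simp
  | cons e t ih =>
    intro acc
    by_cases hg : good e = true
    · simp only [List.foldl_cons, hg]
      rw [if_neg (by simp [hg]), ih]
      congr 1
      funext c
      by_cases hc : c = e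
      · subst hc; simp [hg]
      · simp [List.contains_cons, hc]
    · simp only [List.foldl_cons]
      rw [if_pos (by simpa using hg), ih, List.filter_filter]
      congr 1
      funext c
      by_cases hc : c = e
      · subst hc; simp_all
      · simp [List.contains_cons, hc]

def pvEnList : List Char :=
  ['A','B','C','D','E','F','G','H','I','J','K','L','M','N','O','P','Q','R','S',
   'T','U','V','W','X','Y','Z','0','1','2','3','4','5','6','7','8','9']

theorem mem_enList_iff (c : Char) :
    pvEnList.contains c = decide (('A' ≤ c ∧ c ≤ 'Z') ∨ ('0' ≤ c ∧ c ≤ '9')) := by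
  by_cases h : c ∈ pvEnList
  · have h2 : decide (('A' ≤ c ∧ c ≤ 'Z') ∨ ('0' ≤ c ∧ c ≤ '9')) = true := by
      fin_cases h <;> decide
    simp [h, h2]
  · have h2 : ¬ (('A' ≤ c ∧ c ≤ 'Z') ∨ ('0' ≤ c ∧ c ≤ '9')) := by
      intro hr
      apply h
      have hc : Char.ofNat c.toNat = c := Char.ofNat_toNat c
      rcases hr with ⟨h1, h2⟩ | ⟨h1, h2⟩
      · have l1 : 65 ≤ c.toNat := h1
        have l2 : c.toNat ≤ 90 := h2
        interval_cases h3 : c.toNat <;> subst hc <;> decide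
      · have l1 : 48 ≤ c.toNat := h1
        have l2 : c.toNat ≤ 57 := h2
        interval_cases h3 : c.toNat <;> subst hc <;> decide
    simp [h, h2]

-- the two encnum cleanups agree on any string
theorem strfold_toList (l : List Char) :
    ∀ (acc : String),
      (l.foldl (fun en e => if pvEnList.contains e = false then PySem.Str.replace en (String.ofList [e]) "" else en) acc).toList
        = l.foldl (fun en e => if pvEnList.contains e = false then en.filter (fun c => !(c == e)) else en) acc.toList := by
  induction l with
  | nil => intro acc; rfl
  | cons e t ih =>
    intro acc
    by_cases h : pvEnList.contains e = false
    · simp only [List.foldl_cons, if_pos h]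
      rw [ih]
      congr 1
      rw [PySem.Str.toList_replace]
      have h1 : (String.ofList [e]).toList = [e] := String.toList_ofList
      have h2 : ("" : String).toList = [] := rfl
      rw [h1, h2, replace_del]
    · simp only [List.foldl_cons, if_neg h]
      exact ih acc

theorem enc_filters (l : List Char) :
    (((l.filter (fun c => !(c == '-'))).filter (fun c => !(c == '.'))).filter (fun c => !(c == '('))).filter
      (fun c => pvEnList.contains c
        || !((((l.filter (fun c => !(c == '-'))).filter (fun c => !(c == '.'))).filter
              (fun c => !(c == '('))).contains c))
    = l.filter (fun c => decide (('A' ≤ c ∧ c ≤ 'Z') ∨ ('0' ≤ c ∧ c ≤ '9'))) := by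
  rw [List.filter_filter, List.filter_filter, List.filter_filter]
  apply List.filter_congr
  intro c hc
  by_cases h1 : c = '-'
  · subst h1; simp
  by_cases h2 : c = '.'
  · subst h2; simp
  by_cases h3 : c = '('
  · subst h3; simp
  have hm : ((((l.filter (fun c => !(c == '-'))).filter (fun c => !(c == '.'))).filter
      (fun c => !(c == '('))).contains c) = true :=
    List.elem_eq_true_of_mem (by simp [List.mem_filter, hc, h1, h2, h3])
  rw [hm, mem_enList_iff]
  have b1 : (c == '-') = false := beq_eq_false_iff_ne.mpr h1
  have b2 : (c == '.') = false := beq_eq_false_iff_ne.mpr h2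
  have b3 : (c == '(') = false := beq_eq_false_iff_ne.mpr h3
  rw [b1, b2, b3]
  simp

set_option maxHeartbeats 1000000 in
theorem enc_clean_eq (s : String) :
    (PySem.Str.replace (PySem.Str.replace (PySem.Str.replace s "-" "") "." "") "(" "").toList.foldl
        (fun en e => if pvEnList.contains e = false then PySem.Str.replace en (String.ofList [e]) "" else en)
        (PySem.Str.replace (PySem.Str.replace (PySem.Str.replace s "-" "") "." "") "(" "")
      = String.ofList (s.toList.foldl
          (fun kept c => if ('A' ≤ c ∧ c ≤ 'Z') ∨ ('0' ≤ c ∧ c ≤ '9') then kept ++ [c] else kept) []) := by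
  apply String.toList_inj.mp
  rw [strfold_toList, loop_filter pvEnList.contains]
  have hrepl : (PySem.Str.replace (PySem.Str.replace (PySem.Str.replace s "-" "") "." "") "(" "").toList
      = ((s.toList.filter (fun c => !(c == '-'))).filter (fun c => !(c == '.'))).filter (fun c => !(c == '(')) := by
    simp only [PySem.Str.toList_replace]
    have h1 : ("-" : String).toList = ['-'] := rfl
    have h2 : ("." : String).toList = ['.'] := rfl
    have h3 : ("(" : String).toList = ['('] := rfl
    have h4 : ("" : String).toList = [] := rfl
    rw [h1, h2, h3, h4, replace_del, replace_del, replace_del]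
  rw [hrepl]
  rw [PySem.List.foldl_append_ite_eq_filter, String.toList_ofList, List.nil_append]
  exact enc_filters s.toList

-- ===== the issue pipeline =====
def pvG (c : Char) : List Char :=
  if c = '-' ∨ c = '(' then []
  else if c = 'L' ∨ c = 'I' ∨ c = 'T' then ['1']
  else if c = 'O' ∨ c = 'Q' ∨ c = 'U' ∨ c = 'D' then ['0']
  else if c = 'Z' then ['2']
  else if c = 'B' then ['3']
  else if c = 'A' then ['4']
  else if c = 'S' then ['5']
  else [c]

theorem issue_list_eq : ∀ l : List Char,
    (((((((((((((l.filter (fun c => !(c == '-'))).filter (fun c => !(c == '('))).map (fun c => if c = 'L' then '1' else c)).map (fun c => if c = 'O' then '0' else c)).map (fun c => if c = 'Q' then '0' else c)).map (fun c => if c = 'U' then '0' else c)).map (fun c => if c = 'D' then '0' else c)).map (fun c => if c = 'I' then '1' else c)).map (fun c => if c = 'Z' then '2' else c)).map (fun c => if c = 'B' then '3' else c)).map (fun c => if c = 'A' then '4' else c)).map (fun c => if c = 'S' then '5' else c)).map (fun c => if c = 'T' then '1' else c))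
      = l.flatMap pvG := by
  intro l
  induction l with
  | nil => rfl
  | cons c t ih =>
    by_cases h1 : c = '-'
    · simp [h1, pvG, ih.symm]
    · by_cases h2 : c = '('
      · simp [h1, h2, pvG, ih.symm]
      · have hb1 : (c == '-') = false := beq_eq_false_iff_ne.mpr h1
        have hb2 : (c == '(') = false := beq_eq_false_iff_ne.mpr h2
        by_cases hL : c = 'L'
        · subst hL; simp [pvG]; simpa using ih
        by_cases hO : c = 'O'
        · subst hO; simp [pvG]; simpa using ih
        by_cases hQ : c = 'Q'
        · subst hQ; simp [pvG]; simpa using ih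
        by_cases hU : c = 'U'
        · subst hU; simp [pvG]; simpa using ih
        by_cases hD : c = 'D'
        · subst hD; simp [pvG]; simpa using ih
        by_cases hI : c = 'I'
        · subst hI; simp [pvG]; simpa using ih
        by_cases hZ : c = 'Z'
        · subst hZ; simp [pvG]; simpa using ih
        by_cases hB : c = 'B'
        · subst hB; simp [pvG]; simpa using ih
        by_cases hA : c = 'A'
        · subst hA; simp [pvG]; simpa using ih
        by_cases hS : c = 'S'
        · subst hS; simp [pvG]; simpa using ih
        by_cases hT : c = 'T'
        · subst hT; simp [pvG]; simpa using ih
        simp [pvG, hb1, hb2, h1, h2, hL, hO, hQ, hU, hD, hI, hZ, hB, hA, hS, hT]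
        simpa using ih

theorem issue_clean_eq (s : String) :
    PySem.Str.replace (PySem.Str.replace (PySem.Str.replace (PySem.Str.replace (PySem.Str.replace
      (PySem.Str.replace (PySem.Str.replace (PySem.Str.replace (PySem.Str.replace (PySem.Str.replace
      (PySem.Str.replace (PySem.Str.replace (PySem.Str.replace s "-" "") "(" "") "L" "1") "O" "0")
      "Q" "0") "U" "0") "D" "0") "I" "1") "Z" "2") "B" "3") "A" "4") "S" "5") "T" "1"
    = String.ofList (s.toList.foldl
        (fun out c =>
          if c = '-' ∨ c = '(' then out
          else if c = 'L' ∨ c = 'I' ∨ c = 'T' then out ++ ['1']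
          else if c = 'O' ∨ c = 'Q' ∨ c = 'U' ∨ c = 'D' then out ++ ['0']
          else if c = 'Z' then out ++ ['2']
          else if c = 'B' then out ++ ['3']
          else if c = 'A' then out ++ ['4']
          else if c = 'S' then out ++ ['5']
          else out ++ [c]) []) := by
  apply String.toList_inj.mp
  rw [PySem.List.foldl_congr_mem _ _ (fun out c => out ++ pvG c) []
      (by intro acc x _; simp only [pvG]; split_ifs <;> simp)]
  rw [PySem.List.foldl_append_eq_flatMap, String.toList_ofList, List.nil_append]
  rw [← issue_list_eq]
  simp only [PySem.Str.toList_replace]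
  have h0 : ("" : String).toList = [] := rfl
  rw [h0]
  rw [show ("-" : String).toList = ['-'] from rfl, show ("(" : String).toList = ['('] from rfl,
    show ("L" : String).toList = ['L'] from rfl, show ("1" : String).toList = ['1'] from rfl,
    show ("O" : String).toList = ['O'] from rfl, show ("0" : String).toList = ['0'] from rfl,
    show ("Q" : String).toList = ['Q'] from rfl, show ("U" : String).toList = ['U'] from rfl,
    show ("D" : String).toList = ['D'] from rfl, show ("I" : String).toList = ['I'] from rfl,
    show ("Z" : String).toList = ['Z'] from rfl, show ("2" : String).toList = ['2'] from rfl,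
    show ("B" : String).toList = ['B'] from rfl, show ("3" : String).toList = ['3'] from rfl,
    show ("A" : String).toList = ['A'] from rfl, show ("4" : String).toList = ['4'] from rfl,
    show ("S" : String).toList = ['S'] from rfl, show ("5" : String).toList = ['5'] from rfl,
    show ("T" : String).toList = ['T'] from rfl]
  rw [replace_del, replace_del, replace_map, replace_map, replace_map, replace_map, replace_map,
    replace_map, replace_map, replace_map, replace_map, replace_map, replace_map]

-- ===== VERDICT (by name: the statement is the Claim_ definition above) =====
theorem code1ocr_issue_encnum_spec : Claim_equal_code1ocr_issue_encnum := by
  intro results _ _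
  unfold Spec_code1ocr_issue_encnum code1ocr_issue_encnum code1ocr_issue_encnum_alt
  dsimp only
  have hlist : (['A','B','C','D','E','F','G','H','I','J','K','L','M','N','O','P','Q','R','S',
      'T','U','V','W','X','Y','Z','0','1','2','3','4','5','6','7','8','9'] : List Char) = pvEnList := rfl
  simp only [hlist]
  generalize (if (results.foldl (fun acc r => acc ++ [PySem.Str.replace ((PySem.List.pyGet? r 1).getD "") " " ""]) []).length = 2 then
      ((PySem.List.pyGet? (results.foldl (fun acc r => acc ++ [PySem.Str.replace ((PySem.List.pyGet? r 1).getD "") " " ""]) []) 0).getD "",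
       (PySem.List.pyGet? (results.foldl (fun acc r => acc ++ [PySem.Str.replace ((PySem.List.pyGet? r 1).getD "") " " ""]) []) 1).getD "")
    else
      ((PySem.List.pyGet? (results.foldl (fun acc r => acc ++ [PySem.Str.replace ((PySem.List.pyGet? r 1).getD "") " " ""]) []) 0).getD "", "~")) = p
  refine Prod.ext ?_ ?_
  · exact issue_clean_eq p.1
  · by_cases h : p.2 ≠ "-"
    · simp only [if_pos h]
      exact enc_clean_eq p.2
    · simp only [if_neg h]
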